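-- pv_equiv track=rewrite | github.com/joannku/journaling | src/modules/JournalAnalysisManager.py | has_dropped_out
-- ===== SOURCE A (Python) =====
-- def has_dropped_out(row):
--     day_columns = [
--         "Day0",
--         "Day1",
--         "Day2",
--         "Day3",
--         "Day4",
--         "Day5",
--         "Day6",
--         "Day7",
--         "Day8",
--         "Day9",
--         "Day10",
--         "Day11",
--         "Day12",
--         "Day13",
--     ]
--
--     # Get the current DayCount for the user
--     current_day_count = row["DayCount"]
--
--     # Convert day columns up to current DayCount into a binary string of 0s and 1s
--     # 0 if no journaling on that day (word count == 0), 1 otherwise.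
--     binary_string = "".join(
--         [
--             "0" if row[col] == 0 else "1"
--             for col in day_columns[: current_day_count + 1]
--         ]
--     )
--
--     # Check if '000' is present in the binary string
--     return "000" in binary_string
-- ===== SOURCE B (Python) =====
-- def has_dropped_out(row):
--     day_columns = [
--         "Day0", "Day1", "Day2", "Day3", "Day4", "Day5", "Day6",
--         "Day7", "Day8", "Day9", "Day10", "Day11", "Day12", "Day13",
--     ]
--     current_day_count = row["DayCount"]
--     vals = [row[col] for col in day_columns[: current_day_count + 1]]
--
--     # A 3-day gap exists iff the longest run of consecutive zero-days is >= 3.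
--     # Compute that statistic by recursion: count the leading zero run, then
--     # skip past the first nonzero value and recurse on the remainder.
--     def longest_zero_run(vs):
--         if not vs:
--             return 0
--         k = 0
--         while k < len(vs) and vs[k] == 0:
--             k += 1
--         if k == len(vs):
--             return k
--         return max(k, longest_zero_run(vs[k + 1:]))
--
--     return longest_zero_run(vals) >= 3
-- ===== Notes on version B (the rewrite author's own statement) =====
-- stated objective: alternative
-- what changed: B computes the longest run of consecutive zero days as a statistic, by recursion that counts the leading zero run and skips past the first nonzero value, and compares it to 3, instead of building a '0'/'1' binary string and searching it for the substring '000'.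
import Mathlib
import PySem

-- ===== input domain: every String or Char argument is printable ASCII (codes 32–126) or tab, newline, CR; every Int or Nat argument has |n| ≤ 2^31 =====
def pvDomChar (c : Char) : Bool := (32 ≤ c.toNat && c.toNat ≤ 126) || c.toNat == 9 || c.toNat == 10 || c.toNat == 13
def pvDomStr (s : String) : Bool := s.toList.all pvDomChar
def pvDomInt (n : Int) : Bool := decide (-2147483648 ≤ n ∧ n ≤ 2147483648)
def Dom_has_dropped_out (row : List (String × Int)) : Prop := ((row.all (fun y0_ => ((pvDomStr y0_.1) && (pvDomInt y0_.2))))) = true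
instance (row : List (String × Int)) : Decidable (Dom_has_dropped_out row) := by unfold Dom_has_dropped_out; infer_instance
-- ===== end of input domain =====

-- B computes the longest run of consecutive zero days (by recursion that skips past the first
-- nonzero value) and compares it to 3, instead of substring-searching a binary string for '000'.

-- ===== PORT A =====
-- the literal day_columns list of A (shared by B, which copies the same constant)
def pvDayColumns : List String :=
  ["Day0", "Day1", "Day2", "Day3", "Day4", "Day5", "Day6",
   "Day7", "Day8", "Day9", "Day10", "Day11", "Day12", "Day13"]

def has_dropped_out (row : List (String × Int)) : Bool :=
  let d : PySem.Dict String Int := PySem.Dict.mk row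
  let currentDayCount := d.getD "DayCount" 0            -- KeyError excluded by Pre_
  let binaryString := PySem.Str.join ""
    ((PySem.List.slice pvDayColumns none (some (currentDayCount + 1))).map
      (fun col => if d.getD col 0 == 0 then "0" else "1"))   -- KeyError excluded by Pre_
  PySem.Str.isIn "000" binaryString

-- ===== PORT B =====
-- longest_zero_run of Source B: count the leading zero run (takeWhile = the while loop),
-- return it if it covers the whole list, else recurse past the first nonzero value.
def pvLongestZeroRun (vs : List Int) : Nat :=
  if h : vs.isEmpty then 0
  else
    let k := (vs.takeWhile (fun v => v == 0)).length
    if k = vs.length then k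
    else max k (pvLongestZeroRun (vs.drop (k + 1)))
termination_by vs.length
decreasing_by
  simp only [List.length_drop]
  have : 0 < vs.length := by
    cases vs with
    | nil => simp at h
    | cons a t => simp
  omega

def has_dropped_out_alt (row : List (String × Int)) : Bool :=
  let d : PySem.Dict String Int := PySem.Dict.mk row
  let currentDayCount := d.getD "DayCount" 0            -- KeyError excluded by Pre_
  let vals := (PySem.List.slice pvDayColumns none (some (currentDayCount + 1))).map
    (fun col => d.getD col 0)                           -- KeyError excluded by Pre_
  decide (3 ≤ pvLongestZeroRun vals)

-- ===== PRECONDITION & SPEC =====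
-- Pre_ excludes exactly the inputs where Python A raises KeyError: "DayCount" missing, or a
-- day column inside the examined slice missing from the row.
def Pre_has_dropped_out (row : List (String × Int)) : Prop :=
  (PySem.Dict.mk row).contains "DayCount" = true ∧
  ∀ col ∈ PySem.List.slice pvDayColumns none (some ((PySem.Dict.mk row).getD "DayCount" 0 + 1)),
    (PySem.Dict.mk row).contains col = true
instance (row : List (String × Int)) : Decidable (Pre_has_dropped_out row) := by
  unfold Pre_has_dropped_out; infer_instance

def pvWitness_has_dropped_out : (List (String × Int)) :=
  [("DayCount", 2), ("Day0", 1), ("Day1", 0), ("Day2", 1)]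

def Spec_has_dropped_out (row : List (String × Int)) (out : Bool) : Prop := out = has_dropped_out_alt row
instance (row : List (String × Int)) (out : Bool) : Decidable (Spec_has_dropped_out row out) := by unfold Spec_has_dropped_out; infer_instance

-- ===== CLAIM (what is proved, stated in full; the proofs are below) =====
def Claim_equal_has_dropped_out : Prop := ∀ (row : List (String × Int)), Dom_has_dropped_out row → Pre_has_dropped_out row → Spec_has_dropped_out row (has_dropped_out row)

-- ===== LEMMAS AND PROOFS =====

-- the per-day marker A uses, on chars
def pvMark (v : Int) : Char := if v == 0 then '0' else '1'

-- a run of j zeros is a prefix of (k zeros ++ '1' :: ys) iff j ≤ k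
theorem pv_prefix_replicate (j : Nat) (k : Nat) (ys : List Char) :
    List.replicate j '0' <+: (List.replicate k '0' ++ '1' :: ys) ↔ j ≤ k := by
  induction j generalizing k with
  | zero => simp
  | succ j ih =>
    cases k with
    | zero => simp [List.replicate_succ, List.cons_prefix_cons]
    | succ k => simp [List.replicate_succ, List.cons_prefix_cons, ih]

-- '000' infix of all-zeros iff at least 3 of them
theorem pv_infix_replicate (k : Nat) :
    ['0', '0', '0'] <:+: List.replicate k '0' ↔ 3 ≤ k := by
  constructor
  · intro h
    have := h.length_le
    simpa using this
  · intro h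
    refine List.IsPrefix.isInfix ?_
    have : List.replicate k '0' = List.replicate 3 '0' ++ List.replicate (k - 3) '0' := by
      rw [← List.replicate_add]; congr 1; omega
    rw [this]; exact ⟨List.replicate (k - 3) '0', rfl⟩
-- '000' infix of (k zeros ++ '1' :: ys) iff 3 ≤ k or '000' infix of ys
theorem pv_infix_split (k : Nat) (ys : List Char) :
    ['0', '0', '0'] <:+: (List.replicate k '0' ++ '1' :: ys) ↔ 3 ≤ k ∨ ['0', '0', '0'] <:+: ys := by
  induction k with
  | zero =>
    simp only [List.replicate_zero, List.nil_append, List.infix_cons_iff]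
    constructor
    · rintro (h | h)
      · exact absurd h (by simp [List.cons_prefix_cons])
      · exact Or.inr h
    · rintro (h | h)
      · omega
      · exact Or.inr h
  | succ k ih =>
    rw [List.replicate_succ, List.cons_append, List.infix_cons_iff]
    have hpre : (['0', '0', '0'] <+: List.replicate k '0' ++ '1' :: ys) ↔ 3 ≤ k := by
      simpa using pv_prefix_replicate 3 k ys
    rw [show ('0' :: (List.replicate k '0' ++ '1' :: ys)) = List.replicate (k+1) '0' ++ '1' :: ys from by simp [List.replicate_succ], show ('0'::'0'::'0'::([]:List Char)) = List.replicate 3 '0' from rfl, pv_prefix_replicate 3 (k+1) ys, show List.replicate 3 '0' = ['0','0','0'] from rfl, ih]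
    have h3 : 3 ≤ k → 3 ≤ k + 1 := by omega
    tauto

-- the key characterisation: substring '000' present iff longest zero run ≥ 3
theorem pv_key (l : List Int) :
    (['0', '0', '0'] <:+: l.map pvMark) ↔ 3 ≤ pvLongestZeroRun l := by
  induction l using pvLongestZeroRun.induct with
  | case1 vs hvs =>
    have : vs = [] := List.isEmpty_iff.mp hvs
    subst this
    simp [pvLongestZeroRun]
  | case2 vs hvs k hk =>
    have htw : vs.takeWhile (fun v => v == 0) = vs :=
      (List.takeWhile_prefix _).eq_of_length hk
    have hall : ∀ v ∈ vs, v = 0 := by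
      intro v hv
      have := List.mem_takeWhile_imp (htw ▸ hv)
      simpa using this
    have hmap : vs.map pvMark = List.replicate vs.length '0' := by
      rw [List.eq_replicate_iff]
      refine ⟨by simp, ?_⟩
      intro b hb
      obtain ⟨v, hv, rfl⟩ := List.mem_map.mp hb
      simp [pvMark, hall v hv]
    rw [hmap, pv_infix_replicate, pvLongestZeroRun, dif_neg hvs, if_pos hk]
    omega
  | case3 vs hvs k hk ih =>
    have hsplit : vs.takeWhile (fun v => v == 0) ++ vs.dropWhile (fun v => v == 0) = vs :=
      List.takeWhile_append_dropWhile
    have hdw : vs.dropWhile (fun v => v == 0) = vs.drop k := by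
      conv_rhs => rw [← hsplit]
      rw [List.drop_left]
    have hdwlen : 0 < (vs.dropWhile (fun v => v == 0)).length := by
      rw [hdw, List.length_drop]
      have hle : k ≤ vs.length := by
        simpa using (List.takeWhile_prefix (l := vs) (fun v => v == 0)).length_le
      omega
    obtain ⟨v, rest, hcons⟩ := List.exists_cons_of_ne_nil (List.length_pos_iff.mp hdwlen)
    have hvne : ¬(v = 0) := by
      have h0 := List.dropWhile_get_zero_not (p := fun v => v == 0) vs hdwlen
      have hget : (List.dropWhile (fun v => v == 0) vs).get ⟨0, hdwlen⟩ = v := by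
        simp [hcons]
      rw [hget] at h0
      simpa using h0
    have htw : vs.takeWhile (fun v => v == 0) = List.replicate k (0 : Int) := by
      rw [List.eq_replicate_iff]
      refine ⟨rfl, ?_⟩
      intro b hb
      have := List.mem_takeWhile_imp hb
      simpa using this
    have hvs_eq : vs = List.replicate k (0 : Int) ++ v :: rest := by
      rw [← hsplit, htw, hcons]
    have hrest : vs.drop (k + 1) = rest := by
      rw [hvs_eq]
      simp [List.drop_append]
    have hmap : vs.map pvMark = List.replicate k '0' ++ '1' :: rest.map pvMark := by
      rw [hvs_eq, List.map_append, List.map_cons]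
      congr 1
      · rw [List.map_replicate]; simp [pvMark]
      · congr 1
        simp [pvMark, hvne]
    rw [hmap, pv_infix_split]
    rw [hrest] at ih
    rw [ih]
    conv_rhs => rw [pvLongestZeroRun, dif_neg hvs, if_neg hk, hrest]
    omega

-- ===== VERDICT (by name: the statement is the Claim_ definition above) =====
theorem has_dropped_out_spec : Claim_equal_has_dropped_out := by
  intro row _ _
  unfold Spec_has_dropped_out has_dropped_out has_dropped_out_alt
  dsimp only
  rw [eq_comm, Bool.eq_iff_iff]
  set d : PySem.Dict String Int := PySem.Dict.mk row with hd
  set cols := PySem.List.slice pvDayColumns none (some (d.getD "DayCount" 0 + 1)) with hcols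
  set l : List Int := cols.map (fun col => d.getD col 0) with hl
  have hmap : cols.map (fun col => if d.getD col 0 == 0 then "0" else "1")
      = (l.map pvMark).map (fun c => String.ofList [c]) := by
    rw [hl, List.map_map, List.map_map]
    apply List.map_congr_left
    intro a _
    by_cases h : d.getD a 0 = 0 <;> simp [pvMark, h]
  rw [decide_eq_true_iff]
  rw [hmap, PySem.Str.isIn_iff_infix, PySem.Str.toList_join]
  have hjoin : PySem.Chars.join "".toList ((((l.map pvMark).map (fun c => String.ofList [c]))).map String.toList)
      = l.map pvMark := by
    have h1 : (((l.map pvMark).map (fun c => String.ofList [c]))).map String.toList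
        = (l.map pvMark).map (fun c => [c]) := by
      rw [List.map_map]
      apply List.map_congr_left
      intro c _
      simp
    rw [h1]
    simpa using PySem.Chars.join_nil_singletons (l.map pvMark)
  rw [hjoin]
  have h000 : "000".toList = ['0', '0', '0'] := by decide
  rw [h000, pv_key l]
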